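-- pv_equiv track=rewrite | github.com/HomosCristian/PEAG | Tema/Tema1&2/TemaSeminar1&2.py | minColumns
-- ===== SOURCE A (Python) =====
-- def minColumns(matrix):
--     columns = []
--     for j in range(len(matrix[0])):
--         min_element = matrix[0][j]
--         for i in range(1, len(matrix)):  # Gasim cel mai mic element
--             min_element = min(min_element, matrix[i][j])
--         if min_element == 5:
--             columns.append(j)
--     return columns
-- ===== SOURCE B (Python) =====
-- def minColumns(matrix):
--     width = len(matrix[0])
--     return [j for j in range(width)
--             if all(row[j] >= 5 for row in matrix)
--             and any(row[j] == 5 for row in matrix)]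
-- ===== Notes on version B (the rewrite author's own statement) =====
-- stated objective: simpler
-- what changed: Drops the running-minimum computation entirely: a column's minimum equals 5 iff every entry is >= 5 and some entry equals 5, so B is a one-line comprehension testing that logical characterization with all/any per column.
import Mathlib
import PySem

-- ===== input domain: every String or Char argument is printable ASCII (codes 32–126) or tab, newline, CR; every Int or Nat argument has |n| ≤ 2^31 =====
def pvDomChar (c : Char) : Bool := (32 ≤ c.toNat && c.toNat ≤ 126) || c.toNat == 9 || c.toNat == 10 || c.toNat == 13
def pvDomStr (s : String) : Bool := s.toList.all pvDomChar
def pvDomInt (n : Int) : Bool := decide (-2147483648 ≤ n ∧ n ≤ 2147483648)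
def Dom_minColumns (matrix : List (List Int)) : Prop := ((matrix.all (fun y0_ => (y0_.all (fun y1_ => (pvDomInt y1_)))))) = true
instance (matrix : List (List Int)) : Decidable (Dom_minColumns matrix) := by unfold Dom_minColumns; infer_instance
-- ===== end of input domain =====

-- B drops the running-minimum computation: a column's minimum is 5 iff every entry is
-- >= 5 and some entry equals 5; B tests that characterization per column with all/any.


-- ===== PORT A =====
-- literal transliteration: for j in range(len(matrix[0])): fold min over i in range(1, len(matrix)); append j if the min is 5
def minColumns (matrix : List (List Int)) : List Int :=
  (PySem.List.pyRange 0 (PySem.List.len (PySem.List.pyGetD matrix 0 [])) 1).foldl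
    (fun columns j =>
      let min_element :=
        (PySem.List.pyRange 1 (PySem.List.len matrix) 1).foldl
          (fun m i => min m (PySem.List.pyGetD (PySem.List.pyGetD matrix i []) j 0))
          (PySem.List.pyGetD (PySem.List.pyGetD matrix 0 []) j 0)
      if min_element == 5 then columns ++ [j] else columns)
    []

-- ===== PORT B =====
-- literal transliteration of Source B: comprehension over range(width) filtered by
-- all(row[j] >= 5) and any(row[j] == 5) over the rows
def minColumns_alt (matrix : List (List Int)) : List Int :=
  let width := PySem.List.len (PySem.List.pyGetD matrix 0 [])
  (PySem.List.pyRange 0 width 1).filter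
    (fun j =>
      (matrix.all (fun row => decide (5 ≤ PySem.List.pyGetD row j 0))) &&
      (matrix.any (fun row => PySem.List.pyGetD row j 0 == 5)))

-- ===== PRECONDITION & SPEC =====
-- Pre_ excludes exactly the inputs where A raises IndexError: the empty matrix, and
-- matrices with a row shorter than row 0 (accessed at matrix[i][j] for j < len(matrix[0])).
def Pre_minColumns (matrix : List (List Int)) : Prop :=
  matrix ≠ [] ∧ ∀ row ∈ matrix, (matrix.headD []).length ≤ row.length
instance (matrix : List (List Int)) : Decidable (Pre_minColumns matrix) := by
  unfold Pre_minColumns; infer_instance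
def pvWitness_minColumns : List (List Int) := [[5, 1, 2], [6, 5, 5], [7, 8, 5]]

def Spec_minColumns (matrix : List (List Int)) (out : List Int) : Prop := out = minColumns_alt matrix
instance (matrix : List (List Int)) (out : List Int) : Decidable (Spec_minColumns matrix out) := by unfold Spec_minColumns; infer_instance

-- ===== CLAIM (what is proved, stated in full; the proofs are below) =====
def Claim_equal_minColumns : Prop := ∀ (matrix : List (List Int)), Dom_minColumns matrix → Pre_minColumns matrix → Spec_minColumns matrix (minColumns matrix)

-- ===== LEMMAS AND PROOFS =====

-- min-fold characterization: the fold of min is 5 iff everything is ≥ 5 and something is 5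
theorem foldl_min_eq_five (l : List Int) : ∀ (a : Int),
    (l.foldl min a = 5) ↔ ((5 ≤ a ∧ ∀ x ∈ l, 5 ≤ x) ∧ (a = 5 ∨ ∃ x ∈ l, x = 5)) := by
  induction l with
  | nil => intro a; simp; omega
  | cons x l ih =>
    intro a
    simp only [List.foldl_cons, ih (min a x), List.mem_cons]
    constructor
    · rintro ⟨⟨h1, h2⟩, h3⟩
      refine ⟨⟨by omega, ?_⟩, ?_⟩
      · rintro y (rfl | hy); · omega
        · exact h2 y hy
      · rcases h3 with h | ⟨y, hy, h5⟩
        · by_cases hax : a ≤ x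
          · left; omega
          · right; exact ⟨x, Or.inl rfl, by omega⟩
        · right; exact ⟨y, Or.inr hy, h5⟩
    · rintro ⟨⟨h1, h2⟩, h3⟩
      have hx : 5 ≤ x := h2 x (Or.inl rfl)
      refine ⟨⟨by omega, fun y hy => h2 y (Or.inr hy)⟩, ?_⟩
      rcases h3 with rfl | ⟨y, (rfl | hy), h5⟩
      · left; omega
      · left; omega
      · right; exact ⟨y, hy, h5⟩

theorem minColumns_spec_aux (h0 : List Int) (rest : List (List Int)) :
    minColumns (h0 :: rest) = minColumns_alt (h0 :: rest) := by
  unfold minColumns minColumns_alt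
  simp only [PySem.List.pyGetD_zero_cons]
  rw [PySem.List.foldl_append_if_eq_filter
    (fun j => ((PySem.List.pyRange 1 (PySem.List.len (h0 :: rest)) 1).foldl
      (fun m i => min m (PySem.List.pyGetD (PySem.List.pyGetD (h0 :: rest) i []) j 0))
      (PySem.List.pyGetD h0 j 0)) == 5)]
  simp only [List.nil_append]
  apply List.filter_congr
  intro j _
  -- A's inner fold over i is the fold over the rows of rest
  have hA : (PySem.List.pyRange 1 (PySem.List.len (h0 :: rest)) 1).foldl
      (fun m i => min m (PySem.List.pyGetD (PySem.List.pyGetD (h0 :: rest) i []) j 0))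
      (PySem.List.pyGetD h0 j 0)
      = rest.foldl (fun acc row => min acc (PySem.List.pyGetD row j 0)) (PySem.List.pyGetD h0 j 0) := by
    rw [PySem.List.foldl_pyRange_pyGetD (f := fun acc row => min acc (PySem.List.pyGetD row j 0))
      (xs := h0 :: rest) (d := []) (init := PySem.List.pyGetD h0 j 0) (by norm_num)]
    rfl
  rw [hA]
  -- compare the two boolean tests as propositions
  rw [Bool.eq_iff_iff]
  have hmap : rest.foldl (fun acc row => min acc (PySem.List.pyGetD row j 0)) (PySem.List.pyGetD h0 j 0)
      = (rest.map (fun row => PySem.List.pyGetD row j 0)).foldl min (PySem.List.pyGetD h0 j 0) := by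
    rw [List.foldl_map]
  simp only [beq_iff_eq, hmap, foldl_min_eq_five, Bool.and_eq_true, List.all_eq_true,
    List.any_eq_true, decide_eq_true_eq, List.mem_map, List.mem_cons]
  constructor
  · rintro ⟨⟨h1, h2⟩, h3⟩
    refine ⟨?_, ?_⟩
    · rintro row (rfl | hr); · exact h1
      · exact h2 _ ⟨row, hr, rfl⟩
    · rcases h3 with h | ⟨x, ⟨row, hr, rfl⟩, h5⟩
      · exact ⟨h0, Or.inl rfl, h⟩
      · exact ⟨row, Or.inr hr, h5⟩
  · rintro ⟨h1, row, hr, h5⟩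
    refine ⟨⟨h1 h0 (Or.inl rfl), ?_⟩, ?_⟩
    · rintro x ⟨r, hr', rfl⟩; exact h1 r (Or.inr hr')
    · rcases hr with rfl | hr
      · exact Or.inl h5
      · exact Or.inr ⟨_, ⟨row, hr, rfl⟩, h5⟩

-- ===== VERDICT (by name: the statement is the Claim_ definition above) =====
theorem minColumns_spec : Claim_equal_minColumns := by
  intro matrix _ hpre
  obtain ⟨hne, -⟩ := hpre
  match matrix, hne with
  | h0 :: rest, _ =>
    show minColumns (h0 :: rest) = minColumns_alt (h0 :: rest)
    exact minColumns_spec_aux h0 rest
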